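-- pv_equiv track=rewrite | github.com/gil9red/Brainfuck | Interpreter Brainfuck.py | get_loops_block
-- ===== SOURCE A (Python) =====
-- def get_loops_block(source: str) -> dict[int, int]:
--     begin_block: list[int] = []
--     blocks: dict[int, int] = dict()
--     for i, s in enumerate(source):
--         if s == "[":
--             begin_block.append(i)
--         elif s == "]":
--             b_i = begin_block.pop()  # b_i -- begin index
--             blocks[i] = b_i
--             blocks[b_i] = i
--     return blocks
-- ===== SOURCE B (Python) =====
-- def get_loops_block(source: str) -> dict[int, int]:
--     blocks: dict[int, int] = dict()
--     for i, s in enumerate(source):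
--         if s == "]":
--             # scan backward for the matching '[' tracking nesting depth
--             depth = 1
--             j = i - 1
--             while j >= 0:
--                 c = source[j]
--                 if c == "]":
--                     depth += 1
--                 elif c == "[":
--                     depth -= 1
--                     if depth == 0:
--                         break
--                 j -= 1
--             if j < 0:
--                 raise IndexError("unmatched ']' at position %d" % i)
--             blocks[i] = j
--             blocks[j] = i
--     return blocks
-- ===== Notes on version B (the rewrite author's own statement) =====
-- stated objective: alternative
-- what changed: Replaced A's explicit stack of open-bracket positions with a stack-free scheme: for each ']' B scans backward with a nesting-depth counter to find its matching '['; like A it raises IndexError on an unmatched ']'.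
import Mathlib
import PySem

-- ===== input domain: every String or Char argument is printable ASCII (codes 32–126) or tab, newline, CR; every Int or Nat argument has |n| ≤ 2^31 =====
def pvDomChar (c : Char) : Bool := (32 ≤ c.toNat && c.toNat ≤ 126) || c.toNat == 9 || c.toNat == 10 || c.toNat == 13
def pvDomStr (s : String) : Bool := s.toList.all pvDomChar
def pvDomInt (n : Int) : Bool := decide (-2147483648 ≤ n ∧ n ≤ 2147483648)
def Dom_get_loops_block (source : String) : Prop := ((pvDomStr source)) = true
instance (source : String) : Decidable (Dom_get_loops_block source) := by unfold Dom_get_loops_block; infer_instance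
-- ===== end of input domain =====

-- B drops A's explicit stack: for each ']' it scans backward with a nesting-depth
-- counter to find the matching '['; objective: alternative (stack-free) decomposition,
-- same result (and, like A, an IndexError on an unmatched ']', outside Pre_).

-- ===== PORT A =====
-- the enumerate-loop, as structural recursion over the characters with index i;
-- stack head = Python list's last element; an empty pop (Python IndexError, outside
-- Pre_) leaves the state unchanged.
def goA (rest : List Char) (i : Nat) (stack : List Int) (blocks : PySem.Dict Int Int) :
    PySem.Dict Int Int :=
  match rest with
  | [] => blocks
  | c :: rs =>
    if c = '[' then goA rs (i + 1) ((i : Int) :: stack) blocks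
    else if c = ']' then
      match stack with
      | [] => goA rs (i + 1) [] blocks
      | b :: t => goA rs (i + 1) t ((blocks.insert (i : Int) b).insert b (i : Int))
    else goA rs (i + 1) stack blocks

def get_loops_block (source : String) : List (Int × Int) :=
  (goA source.toList 0 [] PySem.Dict.empty).items

-- ===== PORT B =====
-- backward scan from position j-1.. for the '[' matching a ']' at depth `depth`;
-- none = Python's raise IndexError (outside Pre_, where the loop just skips).
def matchOpen (cs : List Char) (j : Nat) (depth : Nat) : Option Nat :=
  match j with
  | 0 => none
  | j + 1 =>
    let c := cs.getD j ' '
    if c = ']' then matchOpen cs j (depth + 1)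
    else if c = '[' then
      if depth = 1 then some j else matchOpen cs j (depth - 1)
    else matchOpen cs j depth

def goB (cs : List Char) (rest : List Char) (i : Nat) (blocks : PySem.Dict Int Int) :
    PySem.Dict Int Int :=
  match rest with
  | [] => blocks
  | c :: rs =>
    if c = ']' then
      match matchOpen cs i 1 with
      | some j => goB cs rs (i + 1) ((blocks.insert (i : Int) (j : Int)).insert (j : Int) (i : Int))
      | none => goB cs rs (i + 1) blocks
    else goB cs rs (i + 1) blocks

def get_loops_block_alt (source : String) : List (Int × Int) :=
  (goB source.toList source.toList 0 PySem.Dict.empty).items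

-- ===== PRECONDITION & SPEC =====
-- Pre_ excludes exactly the sources with an excess ']' in some prefix: there both
-- Pythons raise IndexError (A: pop from an empty list; B: explicit raise).
def Pre_get_loops_block (source : String) : Prop :=
  ∀ n < source.toList.length + 1,
    (source.toList.take n).count ']' ≤ (source.toList.take n).count '['
instance (source : String) : Decidable (Pre_get_loops_block source) := by
  unfold Pre_get_loops_block; infer_instance

def pvWitness_get_loops_block : String := "a[+[-]]b"

def Spec_get_loops_block (source : String) (out : List (Int × Int)) : Prop :=
  out = get_loops_block_alt source
instance (source : String) (out : List (Int × Int)) : Decidable (Spec_get_loops_block source out) := by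
  unfold Spec_get_loops_block; infer_instance

-- ===== CLAIM (what is proved, stated in full; the proofs are below) =====
def Claim_equal_get_loops_block : Prop := ∀ (source : String), Dom_get_loops_block source → Pre_get_loops_block source → Spec_get_loops_block source (get_loops_block source)

-- ===== LEMMAS AND PROOFS =====

-- core invariant: if the backward scans starting at i report exactly the stack
-- (depth d+1 finds stack element d), then the two loops agree from i on.
lemma goA_eq_goB (cs : List Char) :
    ∀ (rest : List Char) (i : Nat) (stack : List Nat) (blocks : PySem.Dict Int Int),
      cs.drop i = rest →
      (∀ d : Nat, matchOpen cs i (d + 1) = stack[d]?) →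
      goA rest i (stack.map (fun n => (n : Int))) blocks = goB cs rest i blocks := by
  intro rest
  induction rest with
  | nil => intro i stack blocks _ _; simp [goA, goB]
  | cons c rs ih =>
    intro i stack blocks hdrop hinv
    have hget : cs.getD i ' ' = c := by
      have h : (cs.drop i)[0]? = cs[i + 0]? := List.getElem?_drop
      rw [hdrop] at h
      simp at h
      simp [List.getD, h.symm]
    have hdrop' : cs.drop (i + 1) = rs := by
      have h1 : cs.drop (i + 1) = (cs.drop i).drop 1 := by
        rw [List.drop_drop]
      rw [h1, hdrop]; rfl
    have hstep : ∀ d : Nat, matchOpen cs (i + 1) d =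
        (if c = ']' then matchOpen cs i (d + 1)
         else if c = '[' then (if d = 1 then some i else matchOpen cs i (d - 1))
         else matchOpen cs i d) := by
      intro d; rw [matchOpen]; simp only [hget]
    by_cases hob : c = '['
    · -- push
      have hinv' : ∀ d : Nat, matchOpen cs (i + 1) (d + 1) = (i :: stack)[d]? := by
        intro d
        rw [hstep]
        simp only [hob]
        cases d with
        | zero => simp
        | succ d => simp [hinv d]
      have := ih (i + 1) (i :: stack) blocks hdrop' hinv'
      simpa [goA, goB, hob] using this
    · by_cases hcb : c = ']'
      · cases stack with
        | nil =>
          have hm : matchOpen cs i 1 = none := by simpa using hinv 0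
          have hinv' : ∀ d : Nat, matchOpen cs (i + 1) (d + 1) = ([] : List Nat)[d]? := by
            intro d
            rw [hstep]
            simp only [hcb]
            have := hinv (d + 1)
            simpa using this
          have := ih (i + 1) [] blocks hdrop' hinv'
          simpa [goA, goB, hob, hcb, hm] using this
        | cons b t =>
          have hm : matchOpen cs i 1 = some b := by simpa using hinv 0
          have hinv' : ∀ d : Nat, matchOpen cs (i + 1) (d + 1) = t[d]? := by
            intro d
            rw [hstep]
            simp only [hcb]
            have := hinv (d + 1)
            simpa using this
          have := ih (i + 1) t ((blocks.insert (i : Int) (b : Int)).insert (b : Int) (i : Int)) hdrop' hinv'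
          simpa [goA, goB, hob, hcb, hm] using this
      · have hinv' : ∀ d : Nat, matchOpen cs (i + 1) (d + 1) = stack[d]? := by
          intro d
          rw [hstep]
          simp only [hob, hcb, hinv d]
          tauto
        have := ih (i + 1) stack blocks hdrop' hinv'
        simpa [goA, goB, hob, hcb] using this

-- ===== VERDICT (by name: the statement is the Claim_ definition above) =====
theorem get_loops_block_spec : Claim_equal_get_loops_block := by
  intro source _ _
  unfold Spec_get_loops_block get_loops_block get_loops_block_alt
  have := goA_eq_goB source.toList source.toList 0 [] PySem.Dict.empty (by simp)
    (by intro d; rw [matchOpen]; simp)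
  rw [show ([] : List Int) = ([] : List Nat).map (fun n => (n : Int)) from rfl, this]
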